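-- pv_equiv track=rewrite | github.com/Reneechang17/Leetcode-Solution | 2001-3000/2578. Split With Minimum Sum.py | splitNum
-- ===== SOURCE A (Python) =====
-- def splitNum(num: int) -> int:
--     # split num -> arr ["1","2","3","4"]
--     # alternately assign values to the two num
--     digits = sorted(str(num))
--     num1 = num2 = 0
--     for i, d in enumerate(digits):
--         if i % 2 == 0:
--             num1 = num1 * 10 + int(d)
--         else:
--             num2 = num2 * 10 + int(d)
--
--     return num1 + num2
-- ===== SOURCE B (Python) =====
-- def splitNum(num: int) -> int:
--     # Pair sorted digits from the end with a single running place value: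
--     # the two largest digits share place 1, next two place 10, etc.
--     digits = sorted(str(num))
--     total = 0
--     place = 1
--     i = len(digits) - 1
--     while i >= 1:
--         total += (int(digits[i]) + int(digits[i - 1])) * place
--         place *= 10
--         i -= 2
--     if i == 0:
--         total += int(digits[0]) * place
--     return total
-- ===== Notes on version B (the rewrite author's own statement) =====
-- stated objective: alternative
-- what changed: B replaces A's two alternating accumulators and even/odd branch by a single back-to-front pass over the sorted digits, adding each pair of digits times one running place value.
import Mathlib
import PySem

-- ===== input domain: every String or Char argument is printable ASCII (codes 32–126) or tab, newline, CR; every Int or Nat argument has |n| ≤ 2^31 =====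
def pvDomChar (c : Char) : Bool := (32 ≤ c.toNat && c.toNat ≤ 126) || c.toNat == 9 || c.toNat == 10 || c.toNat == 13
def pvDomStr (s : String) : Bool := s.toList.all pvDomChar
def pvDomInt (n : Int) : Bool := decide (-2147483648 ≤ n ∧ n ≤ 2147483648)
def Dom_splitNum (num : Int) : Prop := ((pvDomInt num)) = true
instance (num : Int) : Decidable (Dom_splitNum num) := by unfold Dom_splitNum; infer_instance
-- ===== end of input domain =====

-- B pairs the sorted digits from the end with one running place value instead of
-- A's two alternating accumulators; same cost, different decomposition (objective: alternative).

-- int(d) for a single character; exact for the digit characters that arise under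
-- Pre_splitNum (num ≥ 0, so str(num) is digits only; '-' would be a ValueError, excluded).
def pvDigitVal (d : Char) : Int := (PySem.Int.ofChars? [d]).getD 0

-- ===== PORT A =====
def splitNum (num : Int) : Int :=
  let digits := PySem.List.sorted (PySem.Int.toStr num).toList (fun c => c) false
  let st := digits.foldl
    (fun (st : Nat × Int × Int) d =>
      if st.1 % 2 == 0 then (st.1 + 1, st.2.1 * 10 + pvDigitVal d, st.2.2)
      else (st.1 + 1, st.2.1, st.2.2 * 10 + pvDigitVal d))
    (0, 0, 0)
  st.2.1 + st.2.2

-- ===== PORT B =====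
-- the while loop of Source B: walk the sorted digits from the end two at a time,
-- multiplying the running place value by 10 after each pair (realised as a
-- recursion over the reversed digit list)
def pvGo : List Char → Int → Int
  | [], _ => 0
  | [d], place => pvDigitVal d * place
  | d1 :: d2 :: rest, place => (pvDigitVal d1 + pvDigitVal d2) * place + pvGo rest (place * 10)

def splitNum_alt (num : Int) : Int :=
  let digits := PySem.List.sorted (PySem.Int.toStr num).toList (fun c => c) false
  pvGo digits.reverse 1

-- ===== PRECONDITION & SPEC =====
-- Pre_ excludes negative num: there str(num) contains '-' and int('-') raises ValueError in A (and in B).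
def Pre_splitNum (num : Int) : Prop := 0 ≤ num
instance (num : Int) : Decidable (Pre_splitNum num) := by unfold Pre_splitNum; infer_instance
def pvWitness_splitNum : Int := (4325)

def Spec_splitNum (num : Int) (out : Int) : Prop := out = splitNum_alt num
instance (num : Int) (out : Int) : Decidable (Spec_splitNum num out) := by unfold Spec_splitNum; infer_instance

-- ===== CLAIM (what is proved, stated in full; the proofs are below) =====
def Claim_equal_splitNum : Prop := ∀ (num : Int), Dom_splitNum num → Pre_splitNum num → Spec_splitNum num (splitNum num)

-- ===== LEMMAS AND PROOFS =====

-- A's alternation, with the accumulators swapped at each step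
def pvF : List Char → Int → Int → Int
  | [], a, b => a + b
  | d :: ds, a, b => pvF ds b (a * 10 + pvDigitVal d)

-- closed-form weighted sum: digit at distance (length-1-i) from the end gets place 10^((length-1-i)/2)
def pvW : List Char → Int
  | [] => 0
  | d :: ds => pvDigitVal d * 10 ^ (ds.length / 2) + pvW ds

-- the same weighted sum read off the reversed list two digits at a time
def pvWr : List Char → Int
  | [] => 0
  | [d] => pvDigitVal d
  | d1 :: d2 :: rest => pvDigitVal d1 + pvDigitVal d2 + 10 * pvWr rest

theorem pvF_foldl (ds : List Char) : ∀ (i : Nat) (a b : Int),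
    (ds.foldl
      (fun (st : Nat × Int × Int) d =>
        if st.1 % 2 == 0 then (st.1 + 1, st.2.1 * 10 + pvDigitVal d, st.2.2)
        else (st.1 + 1, st.2.1, st.2.2 * 10 + pvDigitVal d))
      (i, a, b)).2.1 +
    (ds.foldl
      (fun (st : Nat × Int × Int) d =>
        if st.1 % 2 == 0 then (st.1 + 1, st.2.1 * 10 + pvDigitVal d, st.2.2)
        else (st.1 + 1, st.2.1, st.2.2 * 10 + pvDigitVal d))
      (i, a, b)).2.2 =
    if i % 2 = 0 then pvF ds a b else pvF ds b a := by
  induction ds with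
  | nil =>
    intro i a b
    simp only [List.foldl_nil, pvF]
    split <;> ring
  | cons d ds ih =>
    intro i a b
    simp only [List.foldl_cons]
    by_cases h : i % 2 = 0
    · have hc : (i % 2 == 0) = true := by simp [h]
      have h1 : (i + 1) % 2 = 1 := by omega
      rw [if_pos hc]
      rw [ih]
      simp [pvF, h1, h]
    · have hc : ¬ ((i % 2 == 0) = true) := by simp [h]
      have h1 : (i + 1) % 2 = 0 := by omega
      rw [if_neg hc]
      rw [ih]
      simp [pvF, h1, h]

theorem pvF_eq (ds : List Char) : ∀ (a b : Int),
    pvF ds a b = a * 10 ^ ((ds.length + 1) / 2) + b * 10 ^ (ds.length / 2) + pvW ds := by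
  induction ds with
  | nil => intro a b; simp [pvF, pvW]
  | cons d ds ih =>
    intro a b
    have h1 : (ds.length + 1 + 1) / 2 = ds.length / 2 + 1 := by omega
    simp only [pvF, pvW, ih, List.length_cons, h1]
    ring

theorem pvGo_eq (l : List Char) (p : Int) : pvGo l p = p * pvWr l := by
  induction l, p using pvGo.induct with
  | case1 p => simp [pvGo, pvWr]
  | case2 d p => simp [pvGo, pvWr]; ring
  | case3 d1 d2 rest p ih => simp [pvGo, pvWr, ih]; ring

theorem pvWr_append (l : List Char) : ∀ (d : Char),
    pvWr (l ++ [d]) = pvWr l + pvDigitVal d * 10 ^ (l.length / 2) := by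
  induction l using pvWr.induct with
  | case1 => intro d; simp [pvWr]
  | case2 e => intro d; simp [pvWr]
  | case3 e1 e2 rest ih =>
    intro d
    have h1 : (rest.length + 1 + 1) / 2 = rest.length / 2 + 1 := by omega
    simp only [List.cons_append, pvWr, ih, List.length_cons, h1]
    ring

theorem pvWr_reverse (ds : List Char) : pvWr ds.reverse = pvW ds := by
  induction ds with
  | nil => simp [pvWr, pvW]
  | cons d ds ih =>
    simp only [List.reverse_cons, pvWr_append, ih, List.length_reverse, pvW]
    ring

-- ===== VERDICT (by name: the statement is the Claim_ definition above) =====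
theorem splitNum_spec : Claim_equal_splitNum := by
  intro num _ _
  unfold Spec_splitNum splitNum splitNum_alt
  rw [pvF_foldl, pvGo_eq, pvWr_reverse]
  simp [pvF_eq]
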